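-- pv_equiv track=rewrite | github.com/777-yr/comcan | source/newcomCan.py | set_signal_value_in_message
-- ===== SOURCE A (Python) =====
-- def set_signal_value_in_message(data, start_bit, length, value, byte_order):
--     data_bytes = bytearray(data)
--
--     if byte_order == 'little_endian':
--         for i in range(length):
--             byte_index = (start_bit + i) // 8
--             bit_index = (start_bit + i) % 8
--             if value & (1 << i):
--                 data_bytes[byte_index] |= (1 << bit_index)
--             else:
--                 data_bytes[byte_index] &= ~(1 << bit_index)
--     else:  # big_endian
--         for i in range(length):
--             byte_index = (start_bit + length - 1 - i) // 8
--             bit_index = (start_bit + length - 1 - i) % 8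
--             if value & (1 << i):
--                 data_bytes[byte_index] |= (1 << bit_index)
--             else:
--                 data_bytes[byte_index] &= ~(1 << bit_index)
--
--     return list(data_bytes)
-- ===== SOURCE B (Python) =====
-- def set_signal_value_in_message(data, start_bit, length, value, byte_order):
--     if byte_order == 'little_endian':
--         field = value & ((1 << length) - 1)
--     else:
--         # bit-reverse the low `length` bits of value
--         field = 0
--         for i in range(length):
--             field = (field << 1) | ((value >> i) & 1)
--     n = int.from_bytes(bytes(data), 'little')
--     mask = ((1 << length) - 1) << start_bit
--     n = (n & ~mask) | (field << start_bit)
--     return list(n.to_bytes(len(data), 'little'))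
-- ===== Notes on version B (the rewrite author's own statement) =====
-- stated objective: alternative
-- what changed: B replaces A's per-bit loop that mutates individual bytes of a bytearray by a closed-form integer computation: pack the bytes into one integer, clear the field with a mask, OR in the (possibly bit-reversed) field value shifted into place, and unpack with to_bytes.
-- outside the precondition, e.g. on set_signal_value_in_message([0], -8, 8, 1, 'little_endian'): A returns [1], B raises ValueError; on set_signal_value_in_message([5], 0, -1, 0, 'little_endian'): A returns [5], B raises ValueError
import Mathlib
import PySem

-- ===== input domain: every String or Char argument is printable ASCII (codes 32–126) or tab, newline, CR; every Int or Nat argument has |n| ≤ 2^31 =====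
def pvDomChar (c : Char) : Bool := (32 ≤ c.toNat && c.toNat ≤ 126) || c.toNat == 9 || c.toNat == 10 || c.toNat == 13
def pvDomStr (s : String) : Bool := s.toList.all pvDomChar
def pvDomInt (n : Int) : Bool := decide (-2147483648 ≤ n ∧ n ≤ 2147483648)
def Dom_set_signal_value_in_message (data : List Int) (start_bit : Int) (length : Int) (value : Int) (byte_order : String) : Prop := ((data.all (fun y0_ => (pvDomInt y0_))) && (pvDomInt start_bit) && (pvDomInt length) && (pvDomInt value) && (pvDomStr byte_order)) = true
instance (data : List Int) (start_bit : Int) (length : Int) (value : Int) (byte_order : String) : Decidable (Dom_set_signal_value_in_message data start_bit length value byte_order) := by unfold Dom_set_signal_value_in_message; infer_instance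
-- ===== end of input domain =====

-- B replaces A's per-bit read-modify-write loop over a bytearray by one closed-form integer
-- mask operation (pack bytes into an int, clear the field, OR in the shifted field, unpack);
-- objective: alternative (same asymptotic cost, no claim of speed).

-- ===== PORT A =====
-- one loop iteration of A's per-bit read-modify-write (shared verbatim by both branches of A)
def aStep (value : Int) (db : List Int) (pos : Int) (i : Int) : List Int :=
  let byte_index := PySem.Int.floordiv pos 8
  let bit_index := PySem.Int.mod pos 8
  if PySem.Int.band value ((1 : Int) <<< i.toNat) ≠ 0 then
    PySem.List.pySetD db byte_index (PySem.Int.bor (PySem.List.pyGetD db byte_index 0) ((1 : Int) <<< bit_index.toNat))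
  else
    PySem.List.pySetD db byte_index (PySem.Int.band (PySem.List.pyGetD db byte_index 0) (Int.not ((1 : Int) <<< bit_index.toNat)))

-- `bytearray(data)` raises ValueError for entries outside 0..255; Pre_ excludes that,
-- so the port just copies the list.
def set_signal_value_in_message (data : List Int) (start_bit : Int) (length : Int) (value : Int) (byte_order : String) : List Int :=
  if byte_order = "little_endian" then
    (PySem.List.pyRange 0 length 1).foldl (fun db i => aStep value db (start_bit + i) i) data
  else
    (PySem.List.pyRange 0 length 1).foldl (fun db i => aStep value db (start_bit + length - 1 - i) i) data

-- ===== PORT B =====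
-- port of int.from_bytes(bytes(data), 'little') (exact for byte values 0..255, guaranteed by Pre_)
def altFromBytesLE (ds : List Int) : Int := ds.foldr (fun b acc => b + 256 * acc) 0
-- port of n.to_bytes(len, 'little') (exact for 0 ≤ n < 256^len, guaranteed by Pre_)
def altToBytesLE (len : Nat) (n : Int) : List Int := (List.range len).map (fun k => ((n.toNat / 256 ^ k) % 256 : Nat))

def set_signal_value_in_message_alt (data : List Int) (start_bit : Int) (length : Int) (value : Int) (byte_order : String) : List Int :=
  let field : Int :=
    if byte_order = "little_endian" then PySem.Int.band value ((1 <<< length.toNat) - 1)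
    else (PySem.List.pyRange 0 length 1).foldl
      (fun f i => PySem.Int.bor (f <<< (1 : Nat)) (PySem.Int.band (value >>> i.toNat) 1)) 0
  let n0 := altFromBytesLE data
  let mask := ((1 <<< length.toNat) - 1 : Int) <<< start_bit.toNat
  let n1 := PySem.Int.bor (PySem.Int.band n0 (Int.not mask)) (field <<< start_bit.toNat)
  altToBytesLE data.length n1

-- ===== PRECONDITION & SPEC =====
-- Pre_ excludes inputs on which Python A raises (a byte outside 0..255 → ValueError in
-- bytearray; the field overrunning the array → IndexError) and inputs with negative
-- start_bit or negative length, where A's value comes from Python's negative-index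
-- wraparound (resp. an empty range) while B's shift-based formula raises ValueError.
def Pre_set_signal_value_in_message (data : List Int) (start_bit : Int) (length : Int) (value : Int) (byte_order : String) : Prop :=
  (∀ b ∈ data, 0 ≤ b ∧ b < 256) ∧ 0 ≤ start_bit ∧ 0 ≤ length ∧ start_bit + length ≤ 8 * data.length
instance (data : List Int) (start_bit : Int) (length : Int) (value : Int) (byte_order : String) : Decidable (Pre_set_signal_value_in_message data start_bit length value byte_order) := by unfold Pre_set_signal_value_in_message; infer_instance

def pvWitness_set_signal_value_in_message : List Int × Int × Int × Int × String := ([17, 2], 3, 7, 300, "little_endian")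

def Spec_set_signal_value_in_message (data : List Int) (start_bit : Int) (length : Int) (value : Int) (byte_order : String) (out : List Int) : Prop := out = set_signal_value_in_message_alt data start_bit length value byte_order
instance (data : List Int) (start_bit : Int) (length : Int) (value : Int) (byte_order : String) (out : List Int) : Decidable (Spec_set_signal_value_in_message data start_bit length value byte_order out) := by unfold Spec_set_signal_value_in_message; infer_instance

-- ===== CLAIM (what is proved, stated in full; the proofs are below) =====
def Claim_equal_set_signal_value_in_message : Prop := ∀ (data : List Int) (start_bit : Int) (length : Int) (value : Int) (byte_order : String), Dom_set_signal_value_in_message data start_bit length value byte_order → Pre_set_signal_value_in_message data start_bit length value byte_order → Spec_set_signal_value_in_message data start_bit length value byte_order (set_signal_value_in_message data start_bit length value byte_order)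

-- ===== LEMMAS AND PROOFS =====

theorem pvWitness_ok :
    Dom_set_signal_value_in_message pvWitness_set_signal_value_in_message.1 pvWitness_set_signal_value_in_message.2.1 pvWitness_set_signal_value_in_message.2.2.1 pvWitness_set_signal_value_in_message.2.2.2.1 pvWitness_set_signal_value_in_message.2.2.2.2 ∧
    Pre_set_signal_value_in_message pvWitness_set_signal_value_in_message.1 pvWitness_set_signal_value_in_message.2.1 pvWitness_set_signal_value_in_message.2.2.1 pvWitness_set_signal_value_in_message.2.2.2.1 pvWitness_set_signal_value_in_message.2.2.2.2 := by
  constructor <;> decide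

-- Python's bit t of an arbitrary int (two's complement view)
def pbit (a : Int) (t : Nat) : Bool := if 0 ≤ a then a.toNat.testBit t else !((-a - 1).toNat.testBit t)

theorem pbit_nonneg (a : Int) (h : 0 ≤ a) (t : Nat) : pbit a t = a.toNat.testBit t := if_pos h

theorem pbit_negSucc (m : Nat) (t : Nat) : pbit (Int.negSucc m) t = !(m.testBit t) := by
  have h1 : ¬ (0 : Int) ≤ Int.negSucc m := by rw [Int.negSucc_eq]; omega
  have h2 : (-(Int.negSucc m) - 1).toNat = m := by rw [Int.negSucc_eq]; omega
  rw [pbit, if_neg h1, h2]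

theorem int_not_eq (a : Int) : Int.not a = -a - 1 := by
  cases a with
  | ofNat n => show Int.negSucc n = _ ; rw [Int.negSucc_eq, Int.ofNat_eq_natCast] ; ring
  | negSucc n => show (n : Int) = _ ; rw [Int.negSucc_eq] ; ring

theorem one_shiftLeft_int (t : Nat) : ((1 : Int) <<< t) = ((2 ^ t : Nat) : Int) := by
  show (((1 <<< t : Nat) : Int)) = _
  rw [Nat.one_shiftLeft]

theorem nat_testBit_eq (m n : Nat) : m.testBit n = decide (m / 2 ^ n % 2 = 1) := by
  rw [← Nat.shiftRight_eq_div_pow, ← Nat.testBit_zero, Nat.testBit_shiftRight, Nat.add_zero]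

-- the workhorse: bits of x - (x &&& y) (valid since x &&& y is a bitwise subset of x)
theorem sub_and_testBit (t : Nat) : ∀ (x y : Nat), (x - (x &&& y)).testBit t = (x.testBit t && !(y.testBit t)) := by
  induction t with
  | zero =>
    intro x y
    have hle : x &&& y ≤ x := Nat.and_le_left
    have h0 : ((x &&& y) % 2 = 1) ↔ (x % 2 = 1 ∧ y % 2 = 1) := by
      have h := Nat.testBit_and x y 0
      simp only [Nat.testBit_zero] at h
      rw [← Bool.decide_and] at h
      exact decide_eq_decide.mp h
    simp only [Nat.testBit_zero]
    generalize x &&& y = z at hle h0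
    rw [← decide_not, ← Bool.decide_and]
    apply decide_eq_decide.mpr
    omega
  | succ t ih =>
    intro x y
    have hand : (x &&& y) / 2 = (x / 2) &&& (y / 2) := by
      apply Nat.eq_of_testBit_eq
      intro i
      rw [← Nat.testBit_add_one, Nat.testBit_and, Nat.testBit_and, Nat.testBit_add_one, Nat.testBit_add_one]
    have hpar : (x &&& y) % 2 ≤ x % 2 := by
      have h := Nat.testBit_and x y 0
      simp only [Nat.testBit_zero] at h
      rw [← Bool.decide_and] at h
      have h' := decide_eq_decide.mp h
      omega
    have hle : x &&& y ≤ x := Nat.and_le_left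
    have key : (x - (x &&& y)) / 2 = x / 2 - ((x &&& y) / 2) := by
      generalize x &&& y = z at hpar hle
      omega
    rw [Nat.testBit_add_one, key, hand, ih, Nat.testBit_add_one, Nat.testBit_add_one]

-- A's branch test: value & (1 << t) as a function of the python-bit t of value
theorem band_pow (a : Int) (t : Nat) :
    PySem.Int.band a ((1 : Int) <<< t) = if pbit a t then ((2 ^ t : Nat) : Int) else 0 := by
  rw [one_shiftLeft_int, PySem.Int.band.eq_1]
  by_cases ha : 0 ≤ a
  · simp only [pbit, if_pos ha, if_pos (show (0:Int) ≤ ((2^t : Nat) : Int) by positivity), Int.toNat_natCast]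
    rw [Nat.and_two_pow]
    cases h : a.toNat.testBit t <;> simp [h]
  · simp only [pbit, if_neg ha, if_pos (show (0:Int) ≤ ((2^t : Nat) : Int) by positivity), Int.toNat_natCast]
    rw [Nat.and_comm, Nat.and_two_pow]
    cases h : (-a - 1).toNat.testBit t <;> simp [h]

theorem band_pow_ne_zero (a : Int) (t : Nat) :
    (PySem.Int.band a ((1 : Int) <<< t) ≠ 0) ↔ pbit a t = true := by
  rw [band_pow]
  have h2 : ((2^t : Nat) : Int) ≠ 0 := by positivity
  cases h : pbit a t <;> simp [h2]

-- clearing: x & ~mask for 0 ≤ x, 0 ≤ mask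
theorem band_not (x mask : Int) (hx : 0 ≤ x) (hm : 0 ≤ mask) :
    PySem.Int.band x (Int.not mask) = ((x.toNat - (x.toNat &&& mask.toNat) : Nat) : Int) := by
  rw [int_not_eq, PySem.Int.band.eq_1, if_pos hx, if_neg (by omega)]
  have : (-(-mask - 1) - 1) = mask := by ring
  rw [this]

-- bits of Python's int of a little-endian byte list
theorem altFromBytes_spec (ds : List Int) (h : ∀ b ∈ ds, 0 ≤ b ∧ b < 256) :
    0 ≤ altFromBytesLE ds ∧
    (altFromBytesLE ds).toNat < 2 ^ (8 * ds.length) ∧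
    (∀ k j : Nat, j < 8 → (altFromBytesLE ds).toNat.testBit (8 * k + j) = (ds.getD k 0).toNat.testBit j) := by
  induction ds with
  | nil =>
    refine ⟨le_refl 0, by norm_num [altFromBytesLE], ?_⟩
    intro k j _
    simp [altFromBytesLE, List.getD]
  | cons b t ih =>
    obtain ⟨hb0, hb1⟩ := h b (by simp)
    obtain ⟨ih0, ih1, ih2⟩ := ih (fun x hx => h x (by simp [hx]))
    have hstep : altFromBytesLE (b :: t) = b + 256 * altFromBytesLE t := rfl
    have h0 : 0 ≤ altFromBytesLE (b :: t) := by rw [hstep]; positivity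
    have htn : (altFromBytesLE (b :: t)).toNat = b.toNat + 256 * (altFromBytesLE t).toNat := by
      omega
    refine ⟨h0, ?_, ?_⟩
    · rw [htn]
      have : 2 ^ (8 * (b :: t).length) = 256 * 2 ^ (8 * t.length) := by
        simp [List.length_cons]; ring
      omega
    · intro k j hj
      rw [htn]
      cases k with
      | zero =>
        have hmod : (b.toNat + 256 * (altFromBytesLE t).toNat) % 2 ^ 8 = b.toNat := by omega
        have hbt := Nat.testBit_mod_two_pow (b.toNat + 256 * (altFromBytesLE t).toNat) 8 j
        rw [hmod] at hbt
        simp only [hj, decide_true, Bool.true_and] at hbt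
        simp only [List.getD_cons_zero, Nat.mul_zero, Nat.zero_add]
        exact hbt.symm
      | succ k' =>
        have hdiv : (b.toNat + 256 * (altFromBytesLE t).toNat) / 2 ^ 8 = (altFromBytesLE t).toNat := by
          omega
        have harith : 8 * (k' + 1) + j = (8 * k' + j) + 8 := by ring
        rw [harith, ← Nat.testBit_div_two_pow, hdiv, ih2 k' j hj]
        simp

-- bits of B's little-endian field value
theorem fieldL_spec (value : Int) (l : Nat) :
    ∃ F : Nat, PySem.Int.band value (((1 <<< l : Nat) : Int) - 1) = (F : Int) ∧ F < 2 ^ l ∧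
      ∀ t : Nat, F.testBit t = (decide (t < l) && pbit value t) := by
  have hml : (((1 <<< l : Nat) : Int) - 1) = ((2 ^ l - 1 : Nat) : Int) := by
    rw [Nat.one_shiftLeft]
    have h1 : (1 : Nat) ≤ 2 ^ l := Nat.one_le_two_pow
    push_cast [h1]
    ring
  rw [hml, PySem.Int.band.eq_1]
  by_cases ha : 0 ≤ value
  · rw [if_pos ha, if_pos (by positivity)]
    refine ⟨value.toNat &&& (2 ^ l - 1), ?_, ?_, ?_⟩
    · rw [Int.toNat_natCast]
    · rw [Nat.and_two_pow_sub_one_eq_mod]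
      exact Nat.mod_lt _ (Nat.two_pow_pos l)
    · intro t
      rw [Nat.and_two_pow_sub_one_eq_mod, Nat.testBit_mod_two_pow, pbit_nonneg _ ha]
  · rw [if_neg ha, if_pos (by positivity)]
    refine ⟨(2 ^ l - 1) - ((2 ^ l - 1) &&& (-value - 1).toNat), ?_, ?_, ?_⟩
    · rw [Int.toNat_natCast]
    · have hs : (2 ^ l - 1) - ((2 ^ l - 1) &&& (-value - 1).toNat) ≤ 2 ^ l - 1 := Nat.sub_le _ _
      have h1 : (1 : Nat) ≤ 2 ^ l := Nat.one_le_two_pow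
      omega
    · intro t
      rw [sub_and_testBit, Nat.testBit_two_pow_sub_one]
      have hv : pbit value t = !((-value - 1).toNat.testBit t) := by rw [pbit, if_neg ha]
      rw [hv]

-- one step of B's big-endian bit-reversal: (value >> n) & 1
theorem band_shift_one (value : Int) (n : Nat) :
    PySem.Int.band (value >>> ((((n : Int)).toNat : Int))) 1 = ((if pbit value n then 1 else 0 : Nat) : Int) := by
  have hn : ((((n : Int)).toNat : Int)) = (n : Int) := by rw [Int.toNat_natCast]
  rw [hn, PySem.Int.band_one, PySem.Int.mod_eq_emod_of_pos (by norm_num)]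
  cases value with
  | ofNat m =>
    have h1 : (Int.ofNat m) >>> ((n : Int)) = ((m >>> n : Nat) : Int) := Int.shiftRight_natCast m n
    rw [h1, pbit_nonneg (Int.ofNat m) (by rw [Int.ofNat_eq_natCast]; positivity)]
    have h2 : (Int.ofNat m).toNat = m := rfl
    rw [h2, nat_testBit_eq, Nat.shiftRight_eq_div_pow]
    generalize m / 2 ^ n = q
    rcases Nat.mod_two_eq_zero_or_one q with h | h <;> simp [h] <;> omega
  | negSucc m =>
    have h1 : (Int.negSucc m) >>> ((n : Int)) = Int.negSucc (m >>> n) := Int.shiftRight_negSucc m n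
    rw [h1, pbit_negSucc, nat_testBit_eq, Int.negSucc_eq, Nat.shiftRight_eq_div_pow]
    generalize m / 2 ^ n = q
    rcases Nat.mod_two_eq_zero_or_one q with h | h <;> simp [h] <;> omega

-- bits of B's big-endian (bit-reversed) field value
theorem fieldB_spec (value : Int) (l : Nat) :
    ∃ F : Nat,
      (PySem.List.pyRange 0 (l : Int) 1).foldl
        (fun f i => PySem.Int.bor (f <<< (1 : Nat)) (PySem.Int.band (value >>> i.toNat) 1)) 0 = (F : Int) ∧
      F < 2 ^ l ∧ ∀ t : Nat, F.testBit t = (decide (t < l) && pbit value (l - 1 - t)) := by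
  induction l with
  | zero =>
    exact ⟨0, by simp [PySem.List.pyRange_one_eq_nil], by norm_num, by intro t; simp⟩
  | succ n ih =>
    obtain ⟨F, hF, hFlt, hFbit⟩ := ih
    have hrange : PySem.List.pyRange 0 ((n + 1 : Nat) : Int) 1 = PySem.List.pyRange 0 (n : Int) 1 ++ [(n : Int)] := by
      push_cast
      exact PySem.List.pyRange_one_succ_right (by positivity)
    refine ⟨2 * F + (if pbit value n then 1 else 0), ?_, ?_, ?_⟩
    · rw [hrange, List.foldl_append, hF]
      simp only [List.foldl_cons, List.foldl_nil]
      rw [band_shift_one]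
      have hsh : ((F : Int) <<< (1 : Nat)) = ((F <<< 1 : Nat) : Int) := rfl
      rw [hsh, PySem.Int.bor_natCast]
      have : F <<< 1 ||| (if pbit value n then 1 else 0) = 2 * F + (if pbit value n then 1 else 0) := by
        apply Nat.eq_of_testBit_eq
        intro i
        cases i with
        | zero =>
          rw [Nat.testBit_lor]
          simp only [Nat.testBit_zero]
          cases pbit value n <;> simp [Nat.shiftLeft_eq]
        | succ i' =>
          have h1 : (F <<< 1) / 2 = F := by rw [Nat.shiftLeft_eq]; omega
          have h2 : (2 * F + (if pbit value n then 1 else 0)) / 2 = F := by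
            cases pbit value n <;> simp <;> omega
          have h3 : ((if pbit value n then 1 else 0 : Nat)) / 2 = 0 := by
            cases pbit value n <;> simp
          rw [Nat.testBit_lor, Nat.testBit_add_one, Nat.testBit_add_one, Nat.testBit_add_one,
            h1, h2, h3, Nat.zero_testBit, Bool.or_false]
      rw [this]
    · cases pbit value n <;> simp [pow_succ] <;> omega
    · intro t
      cases t with
      | zero =>
        simp only [Nat.testBit_zero]
        cases h : pbit value n <;> simp [h]
      | succ t' =>
        rw [Nat.testBit_add_one]
        have h2 : (2 * F + (if pbit value n then 1 else 0)) / 2 = F := by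
          cases pbit value n <;> simp <;> omega
        rw [h2, hFbit t']
        have harith : n - 1 - t' = n + 1 - 1 - (t' + 1) := by omega
        rw [harith]
        by_cases ht : t' < n
        · simp [ht, show t' + 1 < n + 1 by omega]
        · simp [ht, show ¬ (t' + 1 < n + 1) by omega]

theorem getD_set_self (xs : List Int) (n : Nat) (v : Int) (h : n < xs.length) :
    (xs.set n v).getD n 0 = v := by
  rw [List.getD_eq_getElem?_getD, List.getElem?_set_self h]
  rfl

theorem getD_set_ne (xs : List Int) (n k : Nat) (v : Int) (h : n ≠ k) :
    (xs.set n v).getD k 0 = xs.getD k 0 := by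
  rw [List.getD_eq_getElem?_getD, List.getElem?_set_ne h, ← List.getD_eq_getElem?_getD]

-- effect of one aStep at a valid nonnegative position
theorem aStep_spec (value : Int) (db : List Int) (p n : Nat)
    (hp : p < 8 * db.length)
    (hbytes : ∀ k, k < db.length → 0 ≤ db.getD k 0 ∧ db.getD k 0 < 256) :
    ∃ c : Nat, aStep value db ((p : Nat) : Int) ((n : Nat) : Int) = db.set (p / 8) ((c : Nat) : Int) ∧
      c < 256 ∧
      ∀ t : Nat, c.testBit t =
        if p % 8 = t then pbit value n else ((db.getD (p / 8) 0).toNat.testBit t) := by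
  have h8 : ((8 : Nat) : Int) = (8 : Int) := by norm_num
  have hk : p / 8 < db.length := by omega
  obtain ⟨hc0, hc1⟩ := hbytes (p / 8) hk
  have hget : PySem.List.pyGetD db ((p : Nat) : Int) 0 = db.getD p 0 := PySem.List.pyGetD_natCast db p 0
  have hfd : PySem.Int.floordiv ((p : Nat) : Int) 8 = ((p / 8 : Nat) : Int) := by
    rw [← h8, PySem.Int.floordiv_natCast]
  have hmd : PySem.Int.mod ((p : Nat) : Int) 8 = ((p % 8 : Nat) : Int) := by
    rw [← h8, PySem.Int.mod_natCast]
  have htn : (((n : Nat) : Int)).toNat = n := Int.toNat_natCast n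
  have htm : (((p % 8 : Nat) : Int)).toNat = p % 8 := Int.toNat_natCast _
  have hshift_nonneg : (0 : Int) ≤ (1 : Int) <<< (p % 8) := by
    rw [one_shiftLeft_int]; positivity
  rw [aStep]
  simp only [hfd, hmd, htn, htm, PySem.List.pyGetD_natCast, PySem.List.pySetD_natCast]
  by_cases hbit : PySem.Int.band value ((1 : Int) <<< n) ≠ 0
  · rw [if_pos hbit]
    have hpb : pbit value n = true := (band_pow_ne_zero value n).mp hbit
    refine ⟨(db.getD (p / 8) 0).toNat ||| 2 ^ (p % 8), ?_, ?_, ?_⟩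
    · rw [PySem.Int.bor_of_nonneg hc0 hshift_nonneg]
      congr 1
      rw [one_shiftLeft_int, Int.toNat_natCast]
    · exact Nat.or_lt_two_pow (show (db.getD (p / 8) 0).toNat < 2 ^ 8 by omega)
        (show 2 ^ (p % 8) < 2 ^ 8 from Nat.pow_lt_pow_right (by norm_num) (by omega))
    · intro t
      rw [Nat.testBit_lor, Nat.testBit_two_pow]
      by_cases ht : p % 8 = t
      · simp [ht, hpb]
      · simp [ht]
  · rw [if_neg hbit]
    have hpb : pbit value n = false := by
      rcases Bool.eq_false_or_eq_true (pbit value n) with h | h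
      · exact absurd ((band_pow_ne_zero value n).mpr h) hbit
      · exact h
    refine ⟨(db.getD (p / 8) 0).toNat - ((db.getD (p / 8) 0).toNat &&& 2 ^ (p % 8)), ?_, ?_, ?_⟩
    · rw [band_not _ _ hc0 hshift_nonneg]
      congr 2
      rw [one_shiftLeft_int, Int.toNat_natCast]
    · omega
    · intro t
      rw [sub_and_testBit, Nat.testBit_two_pow]
      by_cases ht : p % 8 = t
      · simp [ht, hpb]
      · simp [ht]

-- A's loop written against an abstract (injective) position map
def aFold (value : Int) (data : List Int) (posf : Nat → Nat) (n : Nat) : List Int :=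
  (PySem.List.pyRange 0 (n : Int) 1).foldl
    (fun db i => aStep value db ((posf i.toNat : Nat) : Int) i) data

theorem aFold_succ (value : Int) (data : List Int) (posf : Nat → Nat) (n : Nat) :
    aFold value data posf (n + 1) =
      aStep value (aFold value data posf n) ((posf n : Nat) : Int) ((n : Nat) : Int) := by
  unfold aFold
  rw [show ((n + 1 : Nat) : Int) = (n : Int) + 1 by push_cast; ring,
    PySem.List.pyRange_one_succ_right (by positivity), List.foldl_append]
  simp [Int.toNat_natCast]

-- the loop invariant: byte k of the array after n writes
theorem aFold_inv (value : Int) (data : List Int) (posf : Nat → Nat) (n : Nat)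
    (hB : ∀ k, k < data.length → 0 ≤ data.getD k 0 ∧ data.getD k 0 < 256)
    (hpos : ∀ i, i < n → posf i < 8 * data.length)
    (hinj : ∀ i j, i < n → j < n → posf i = posf j → i = j) :
    (aFold value data posf n).length = data.length ∧
    (∀ k, k < data.length →
      0 ≤ (aFold value data posf n).getD k 0 ∧ (aFold value data posf n).getD k 0 < 256) ∧
    (∀ i k j, i < n → j < 8 → posf i = 8 * k + j →
      ((aFold value data posf n).getD k 0).toNat.testBit j = pbit value i) ∧
    (∀ k j, k < data.length → j < 8 → (∀ i, i < n → posf i ≠ 8 * k + j) →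
      ((aFold value data posf n).getD k 0).toNat.testBit j = (data.getD k 0).toNat.testBit j) := by
  induction n with
  | zero =>
    have h0 : aFold value data posf 0 = data := by
      unfold aFold
      rw [PySem.List.pyRange_one_eq_nil (by norm_num)]
      rfl
    refine ⟨by rw [h0], by rw [h0]; exact hB, ?_, ?_⟩
    · intro i _ _ hi _ _; omega
    · intro k j _ _ _; rw [h0]
  | succ n ih =>
    obtain ⟨ihlen, ihB, ihhit, ihmiss⟩ :=
      ih (fun i hi => hpos i (by omega)) (fun i j hi hj => hinj i j (by omega) (by omega))
    have hpn : posf n < 8 * (aFold value data posf n).length := by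
      rw [ihlen]; exact hpos n (by omega)
    obtain ⟨c, hstep, hclt, hcbit⟩ := aStep_spec value (aFold value data posf n) (posf n) n hpn
      (by rw [ihlen] at *; exact ihB)
    have hkn : posf n / 8 < data.length := by omega
    rw [aFold_succ, hstep]
    have hlen : ((aFold value data posf n).set (posf n / 8) ((c : Nat) : Int)).length = data.length := by
      rw [List.length_set, ihlen]
    refine ⟨hlen, ?_, ?_, ?_⟩
    · intro k hk
      by_cases hkk : posf n / 8 = k
      · subst hkk
        rw [getD_set_self _ _ _ (by omega)]
        constructor
        · positivity
        · exact_mod_cast hclt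
      · rw [getD_set_ne _ _ _ _ hkk]
        exact ihB k hk
    · intro i k j hi hj hpij
      by_cases hin : i = n
      · subst hin
        have hk : k = posf i / 8 := by omega
        have hjj : posf i % 8 = j := by omega
        subst hk
        rw [getD_set_self _ _ _ (by omega), Int.toNat_natCast, hcbit, if_pos hjj]
      · have hi' : i < n := by omega
        by_cases hkk : posf n / 8 = k
        · subst hkk
          rw [getD_set_self _ _ _ (by omega), Int.toNat_natCast, hcbit]
          have hne : ¬ (posf n % 8 = j) := by
            intro hcontr
            have : posf n = 8 * (posf n / 8) + j := by omega
            have : posf i = posf n := by omega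
            exact hin (hinj i n (by omega) (by omega) this)
          rw [if_neg hne]
          exact ihhit i _ j hi' hj hpij
        · rw [getD_set_ne _ _ _ _ hkk]
          exact ihhit i k j hi' hj hpij
    · intro k j hk hj hmiss
      have hmiss' : ∀ i, i < n → posf i ≠ 8 * k + j := fun i hi => hmiss i (by omega)
      by_cases hkk : posf n / 8 = k
      · subst hkk
        rw [getD_set_self _ _ _ (by omega), Int.toNat_natCast, hcbit]
        have hne : ¬ (posf n % 8 = j) := by
          intro hcontr
          exact hmiss n (by omega) (by omega)
        rw [if_neg hne]
        exact ihmiss _ j hk hj hmiss'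
      · rw [getD_set_ne _ _ _ _ hkk]
        exact ihmiss k j hk hj hmiss'

-- bits of B's assembled integer (cleared field OR'ed with the shifted field value)
theorem or_clear_testBit (N0 F s l : Nat) (hF : F < 2 ^ l) (q : Nat) :
    ((N0 - (N0 &&& ((2 ^ l - 1) <<< s))) ||| (F <<< s)).testBit q =
      if s ≤ q ∧ q < s + l then F.testBit (q - s) else N0.testBit q := by
  rw [Nat.testBit_lor, sub_and_testBit, Nat.testBit_shiftLeft, Nat.testBit_shiftLeft,
    Nat.testBit_two_pow_sub_one]
  by_cases h1 : s ≤ q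
  · by_cases h2 : q < s + l
    · have h3 : q - s < l := by omega
      simp [ge_iff_le, h1, h2, h3]
    · have h3 : ¬ (q - s < l) := by omega
      have h4 : F.testBit (q - s) = false :=
        Nat.testBit_lt_two_pow (lt_of_lt_of_le hF (Nat.pow_le_pow_right (by norm_num) (by omega)))
      simp [ge_iff_le, h1, h2, h3, h4]
  · have h2 : ¬ (s ≤ q ∧ q < s + l) := by omega
    simp [ge_iff_le, h1, h2]

-- B's assembled integer, bytewise
theorem n1_spec (data : List Int) (s l F : Nat) (hF : F < 2 ^ l)
    (hB : ∀ b ∈ data, 0 ≤ b ∧ b < 256) :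
    ∃ N : Nat,
      PySem.Int.bor
        (PySem.Int.band (altFromBytesLE data) (Int.not ((((1 <<< l : Nat) : Int) - 1) <<< s)))
        ((F : Int) <<< s) = (N : Int) ∧
      ∀ q : Nat, N.testBit q =
        if s ≤ q ∧ q < s + l then F.testBit (q - s)
        else (altFromBytesLE data).toNat.testBit q := by
  obtain ⟨h0, _, _⟩ := altFromBytes_spec data hB
  have h1 : (1 : Nat) ≤ 2 ^ l := Nat.one_le_two_pow
  have hmask : ((((1 <<< l : Nat) : Int) - 1) <<< s) = (((2 ^ l - 1) <<< s : Nat) : Int) := by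
    rw [Nat.one_shiftLeft, show ((2 ^ l : Nat) : Int) - 1 = ((2 ^ l - 1 : Nat) : Int) by
      push_cast [h1]; ring]
    rfl
  rw [hmask, band_not _ _ h0 (by positivity), Int.toNat_natCast,
    show ((F : Int) <<< s) = ((F <<< s : Nat) : Int) from rfl, PySem.Int.bor_natCast]
  exact ⟨_, rfl, fun q => or_clear_testBit _ F s l hF q⟩

theorem altToBytes_length (len : Nat) (n : Int) : (altToBytesLE len n).length = len := by
  simp [altToBytesLE]

theorem altToBytes_getD (len N k : Nat) (hk : k < len) :
    (altToBytesLE len ((N : Nat) : Int)).getD k 0 = ((N / 2 ^ (8 * k) % 256 : Nat) : Int) := by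
  unfold altToBytesLE
  rw [Int.toNat_natCast, List.getD_eq_getElem?_getD, List.getElem?_map, List.getElem?_range hk]
  simp only [Option.map_some, Option.getD_some]
  rw [show (256 : Nat) = 2 ^ 8 by norm_num, ← pow_mul]

theorem byte_testBit (N k j : Nat) (hj : j < 8) :
    (N / 2 ^ (8 * k) % 256).testBit j = N.testBit (8 * k + j) := by
  rw [show (256 : Nat) = 2 ^ 8 by norm_num, Nat.testBit_mod_two_pow, Nat.testBit_div_two_pow]
  simp [hj, Nat.add_comm]

-- the common final step: A's array after all writes equals B's unpacked bytes
theorem lists_eq (value : Int) (data : List Int) (posf : Nat → Nat) (s l F N : Nat)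
    (hB : ∀ b ∈ data, 0 ≤ b ∧ b < 256)
    (hsl : s + l ≤ 8 * data.length)
    (hposdef : ∀ i, i < l → s ≤ posf i ∧ posf i < s + l)
    (hinj : ∀ i j, i < l → j < l → posf i = posf j → i = j)
    (hsurj : ∀ q, s ≤ q → q < s + l → ∃ i, i < l ∧ posf i = q)
    (hFbit : ∀ i, i < l → ∀ q, posf i = q → F.testBit (q - s) = pbit value i)
    (hNbit : ∀ q : Nat, N.testBit q =
      if s ≤ q ∧ q < s + l then F.testBit (q - s)
      else (altFromBytesLE data).toNat.testBit q) :
    aFold value data posf l = altToBytesLE data.length ((N : Nat) : Int) := by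
  have hBk : ∀ k, k < data.length → 0 ≤ data.getD k 0 ∧ data.getD k 0 < 256 := by
    intro k hk
    have hg : data.getD k 0 = data[k] := List.getD_eq_getElem data 0 hk
    rw [hg]
    exact hB _ (List.getElem_mem hk)
  obtain ⟨hAlen, hAB, hAhit, hAmiss⟩ := aFold_inv value data posf l hBk
    (fun i hi => by have := hposdef i hi; omega) hinj
  obtain ⟨h00, _, hbit0⟩ := altFromBytes_spec data hB
  apply List.ext_getElem
  · rw [hAlen, altToBytes_length]
  · intro k hk1 hk2
    have hkL : k < data.length := by rw [hAlen] at hk1; exact hk1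
    rw [← List.getD_eq_getElem (aFold value data posf l) 0 hk1,
      ← List.getD_eq_getElem (altToBytesLE data.length ((N : Nat) : Int)) 0 hk2,
      altToBytes_getD _ _ _ hkL]
    obtain ⟨ha0, ha1⟩ := hAB k hkL
    rw [show (aFold value data posf l).getD k 0
        = (((aFold value data posf l).getD k 0).toNat : Int) from (Int.toNat_of_nonneg ha0).symm]
    congr 1
    apply Nat.eq_of_testBit_eq
    intro t
    by_cases ht : t < 8
    · rw [byte_testBit N k t ht, hNbit]
      by_cases hq : s ≤ 8 * k + t ∧ 8 * k + t < s + l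
      · rw [if_pos hq]
        obtain ⟨i, hil, hpi⟩ := hsurj (8 * k + t) hq.1 hq.2
        rw [hAhit i k t hil ht hpi, hFbit i hil _ hpi]
      · rw [if_neg hq]
        have hmiss : ∀ i, i < l → posf i ≠ 8 * k + t := by
          intro i hi hcontr
          have := hposdef i hi
          omega
        rw [hAmiss k t hkL ht hmiss, hbit0 k t ht]
    · have h256 : (256 : Nat) ≤ 2 ^ t :=
        le_trans (by norm_num : (256 : Nat) ≤ 2 ^ 8) (Nat.pow_le_pow_right (by norm_num) (by omega))
      rw [Nat.testBit_lt_two_pow (by omega), Nat.testBit_lt_two_pow (by omega)]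

-- ===== VERDICT (by name: the statement is the Claim_ definition above) =====
theorem set_signal_value_in_message_spec : Claim_equal_set_signal_value_in_message := by
  intro data start_bit length value byte_order _hdom hpre
  obtain ⟨hB, hs0, hl0, hsl⟩ := hpre
  unfold Spec_set_signal_value_in_message
  obtain ⟨s, rfl⟩ : ∃ s : Nat, start_bit = (s : Int) :=
    ⟨start_bit.toNat, (Int.toNat_of_nonneg hs0).symm⟩
  obtain ⟨l, rfl⟩ : ∃ l : Nat, length = (l : Int) :=
    ⟨length.toNat, (Int.toNat_of_nonneg hl0).symm⟩
  have hslN : s + l ≤ 8 * data.length := by omega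
  simp only [set_signal_value_in_message, set_signal_value_in_message_alt, Int.toNat_natCast]
  by_cases horder : byte_order = "little_endian"
  · rw [if_pos horder, if_pos horder]
    obtain ⟨F, hFeq, hFlt, hFbit⟩ := fieldL_spec value l
    rw [hFeq]
    obtain ⟨N, hNeq, hNbit⟩ := n1_spec data s l F hFlt hB
    rw [hNeq]
    have hA : (PySem.List.pyRange 0 ((l : Nat) : Int) 1).foldl
        (fun db i => aStep value db (((s : Nat) : Int) + i) i) data
        = aFold value data (fun i => s + i) l := by
      unfold aFold
      apply PySem.List.foldl_congr_mem
      intro acc x hx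
      obtain ⟨hx0, hxl⟩ := PySem.List.mem_pyRange_one.mp hx
      have hsx : ((s : Nat) : Int) + x = ((s + x.toNat : Nat) : Int) := by omega
      rw [hsx]
    rw [hA]
    apply lists_eq value data (fun i => s + i) s l F N hB hslN
    · intro i hi; exact ⟨by omega, by omega⟩
    · intro i j _ _ h; omega
    · intro q hq1 hq2; exact ⟨q - s, by omega, by omega⟩
    · intro i hi q hpi
      rw [hFbit]
      have hqs : q - s = i := by omega
      rw [hqs]
      simp [show i < l from hi]
    · exact hNbit
  · rw [if_neg horder, if_neg horder]
    obtain ⟨F, hFeq, hFlt, hFbit⟩ := fieldB_spec value l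
    rw [hFeq]
    obtain ⟨N, hNeq, hNbit⟩ := n1_spec data s l F hFlt hB
    rw [hNeq]
    have hA : (PySem.List.pyRange 0 ((l : Nat) : Int) 1).foldl
        (fun db i => aStep value db (((s : Nat) : Int) + ((l : Nat) : Int) - 1 - i) i) data
        = aFold value data (fun i => s + (l - 1 - i)) l := by
      unfold aFold
      apply PySem.List.foldl_congr_mem
      intro acc x hx
      obtain ⟨hx0, hxl⟩ := PySem.List.mem_pyRange_one.mp hx
      have hsx : ((s : Nat) : Int) + ((l : Nat) : Int) - 1 - x
          = ((s + (l - 1 - x.toNat) : Nat) : Int) := by omega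
      rw [hsx]
    rw [hA]
    apply lists_eq value data (fun i => s + (l - 1 - i)) s l F N hB hslN
    · intro i hi; exact ⟨by omega, by omega⟩
    · intro i j hi hj h; omega
    · intro q hq1 hq2; exact ⟨l - 1 - (q - s), by omega, by omega⟩
    · intro i hi q hpi
      rw [hFbit]
      have hqs : l - 1 - (q - s) = i := by omega
      rw [hqs]
      simp [show q - s < l by omega]
    · exact hNbit
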